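-- pv_equiv track=rewrite | github.com/FOI-Bioinformatics/baitUtils | baitUtils/sequence_analysis.py | count_homopolymer_runs
-- ===== SOURCE A (Python) =====
-- from typing import Union, List, Tuple
--
-- def count_homopolymer_runs(sequence: str, min_length: int = 3) -> List[Tuple[str, int, int]]:
--     """
--     Count homopolymer runs (consecutive identical bases).
--
--     Args:
--         sequence: Input sequence
--         min_length: Minimum run length to report
--
--     Returns:
--         List of (base, start_pos, length) tuples
--     """
--     runs = []
--     if not sequence:
--         return runs
--
--     current_base = sequence[0]
--     current_start = 0
--     current_length = 1
--
--     for i in range(1, len(sequence)):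
--         if sequence[i] == current_base:
--             current_length += 1
--         else:
--             if current_length >= min_length:
--                 runs.append((current_base, current_start, current_length))
--             current_base = sequence[i]
--             current_start = i
--             current_length = 1
--
--     # Check final run
--     if current_length >= min_length:
--         runs.append((current_base, current_start, current_length))
--
--     return runs
-- ===== SOURCE B (Python) =====
-- def count_homopolymer_runs(sequence, min_length=3):
--     n = len(sequence)
--     # Pass 1: positions where a new run begins, plus the end sentinel n.
--     cuts = [i for i in range(n) if i == 0 or sequence[i] != sequence[i - 1]]
--     cuts.append(n)
--     # Pass 2: adjacent cut positions delimit maximal runs.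
--     return [(sequence[st], st, en - st)
--             for st, en in zip(cuts, cuts[1:])
--             if en - st >= min_length]
-- ===== Notes on version B (the rewrite author's own statement) =====
-- stated objective: alternative
-- what changed: Replaces A's online state machine (tracking current base/start/length and emitting as it scans) with a staged boundary computation: first build the list of run-start cut positions plus an end sentinel, then derive each run from adjacent cut pairs by subtraction.
import Mathlib
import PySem

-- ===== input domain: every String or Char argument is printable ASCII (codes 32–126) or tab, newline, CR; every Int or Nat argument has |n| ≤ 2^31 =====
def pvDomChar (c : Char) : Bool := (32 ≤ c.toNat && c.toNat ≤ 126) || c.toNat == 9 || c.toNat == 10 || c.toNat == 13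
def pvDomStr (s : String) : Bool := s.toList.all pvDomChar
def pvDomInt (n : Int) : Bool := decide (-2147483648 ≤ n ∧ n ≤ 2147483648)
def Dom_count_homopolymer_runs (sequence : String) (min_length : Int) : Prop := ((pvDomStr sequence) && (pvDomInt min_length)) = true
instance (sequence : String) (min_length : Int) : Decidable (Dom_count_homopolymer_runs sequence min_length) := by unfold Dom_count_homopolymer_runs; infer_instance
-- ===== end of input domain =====

-- B replaces A's online state machine by two staged passes: run-boundary cut positions, then adjacent-pair differences; objective: alternative.

-- ===== PORT A =====
-- literal transliteration of A: explicit current_base/current_start/current_length state,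
-- loop over range(1, len(sequence)) indexing the sequence (indices are always in range,
-- so pyGetD with a dummy default is exact).
def count_homopolymer_runs (sequence : String) (min_length : Int) : List (String × Int × Int) :=
  let cs := sequence.toList
  if cs = [] then []
  else
    let init : Char × Int × Int × List (String × Int × Int) :=
      (PySem.List.pyGetD cs 0 ' ', 0, 1, [])
    let r :=
      (PySem.List.pyRange 1 (cs.length : Int) 1).foldl
        (fun acc i =>
          let c := PySem.List.pyGetD cs i ' '
          if c = acc.1 then
            (acc.1, acc.2.1, acc.2.2.1 + 1, acc.2.2.2)
          else
            (c, i, 1,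
             if acc.2.2.1 ≥ min_length then
               acc.2.2.2 ++ [(String.ofList [acc.1], acc.2.1, acc.2.2.1)]
             else acc.2.2.2))
        init
    if r.2.2.1 ≥ min_length then r.2.2.2 ++ [(String.ofList [r.1], r.2.1, r.2.2.1)]
    else r.2.2.2

-- ===== PORT B =====
-- Source B: cuts = [i for i in range(n) if i == 0 or sequence[i] != sequence[i-1]]; cuts.append(n);
-- then [(sequence[st], st, en-st) for st, en in zip(cuts, cuts[1:]) if en-st >= min_length].
-- All indexings are in range, so List.getD is exact; zip(cuts, cuts[1:]) is List.zip with tail.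
def count_homopolymer_runs_alt (sequence : String) (min_length : Int) : List (String × Int × Int) :=
  let cs := sequence.toList
  let n := cs.length
  let cuts := ((List.range n).filter (fun i => i == 0 || !(cs.getD i ' ' == cs.getD (i - 1) ' '))) ++ [n]
  (cuts.zip cuts.tail).filterMap (fun p =>
    if ((p.2 : Int) - (p.1 : Int)) ≥ min_length then
      some (String.ofList [cs.getD p.1 ' '], (p.1 : Int), (p.2 : Int) - (p.1 : Int))
    else none)

-- ===== PRECONDITION & SPEC =====
def Spec_count_homopolymer_runs (sequence : String) (min_length : Int) (out : List (String × Int × Int)) : Prop := out = count_homopolymer_runs_alt sequence min_length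
instance (sequence : String) (min_length : Int) (out : List (String × Int × Int)) : Decidable (Spec_count_homopolymer_runs sequence min_length out) := by unfold Spec_count_homopolymer_runs; infer_instance

-- ===== CLAIM (what is proved, stated in full; the proofs are below) =====
def Claim_equal_count_homopolymer_runs : Prop := ∀ (sequence : String) (min_length : Int), Dom_count_homopolymer_runs sequence min_length → Spec_count_homopolymer_runs sequence min_length (count_homopolymer_runs sequence min_length)

-- ===== LEMMAS AND PROOFS =====

-- maximal prefix of identical characters
def pvSpanEq (c : Char) : List Char → Nat × List Char
  | [] => (0, [])
  | x :: xs => if x = c then let p := pvSpanEq c xs; (p.1 + 1, p.2) else (0, x :: xs)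

theorem pvSpanEq_len_le (c : Char) (xs : List Char) : (pvSpanEq c xs).2.length ≤ xs.length := by
  induction xs with
  | nil => simp [pvSpanEq]
  | cons x xs ih =>
    simp only [pvSpanEq]
    split
    · exact Nat.le_succ_of_le ih
    · simp

def pvEmit (m : Int) (c : Char) (s L : Int) : List (String × Int × Int) :=
  if L ≥ m then [(String.ofList [c], s, L)] else []

-- canonical run list: for each maximal run, emit if long enough
def pvRuns (m : Int) : List Char → Int → List (String × Int × Int)
  | [], _ => []
  | c :: ts, pos =>
    let p := pvSpanEq c ts
    pvEmit m c pos ((p.1 : Int) + 1) ++ pvRuns m p.2 (pos + (p.1 : Int) + 1)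
termination_by cs => cs.length
decreasing_by exact Nat.lt_succ_of_le (pvSpanEq_len_le c ts)

-- canonical cut positions: run starts plus the length sentinel
def pvCuts : List Char → List Nat
  | [] => [0]
  | c :: ts =>
    let p := pvSpanEq c ts
    0 :: (pvCuts p.2).map (· + (p.1 + 1))
termination_by cs => cs.length
decreasing_by exact Nat.lt_succ_of_le (pvSpanEq_len_le c ts)

-- A's loop step, on (index, char) pairs (what the pyRange/pyGetD fold becomes)
def pvStepA (m : Int) (acc : Char × Int × Int × List (String × Int × Int)) (p : Int × Char) :
    Char × Int × Int × List (String × Int × Int) :=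
  if p.2 = acc.1 then (acc.1, acc.2.1, acc.2.2.1 + 1, acc.2.2.2)
  else (p.2, p.1, 1,
        if acc.2.2.1 ≥ m then acc.2.2.2 ++ [(String.ofList [acc.1], acc.2.1, acc.2.2.1)]
        else acc.2.2.2)

def pvFin (m : Int) (acc : Char × Int × Int × List (String × Int × Int)) :
    List (String × Int × Int) :=
  acc.2.2.2 ++ pvEmit m acc.1 acc.2.1 acc.2.2.1

theorem pvIfEmit (m : Int) (c : Char) (s L : Int) (runs : List (String × Int × Int)) :
    (if L ≥ m then runs ++ [(String.ofList [c], s, L)] else runs) = runs ++ pvEmit m c s L := by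
  by_cases h : L ≥ m <;> simp [pvEmit, h]

-- bridge: the pyRange/pyGetD index fold is the fold over enumerate (cs.drop a) a
theorem pvBridge {S : Type} (cs : List Char) (g : S → Int → Char → S) :
    ∀ (k a : Nat), cs.length ≤ a + k → ∀ (init : S),
      (PySem.List.pyRange (a : Int) (cs.length : Int) 1).foldl
          (fun acc j => g acc j (PySem.List.pyGetD cs j ' ')) init
        = (PySem.List.enumerate (cs.drop a) (a : Int)).foldl
            (fun acc p => g acc p.1 p.2) init := by
  intro k
  induction k with
  | zero =>
    intro a ha init
    rw [PySem.List.pyRange_one_eq_nil (by exact_mod_cast by omega),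
        List.drop_eq_nil_of_le (by omega)]
    simp [PySem.List.enumerate]
  | succ k ih =>
    intro a ha init
    by_cases h : a < cs.length
    · rw [PySem.List.pyRange_one_cons (by exact_mod_cast h),
          List.drop_eq_getElem_cons h, PySem.List.enumerate_cons]
      simp only [List.foldl_cons]
      rw [PySem.List.pyGetD_natCast cs a ' ', List.getD_eq_getElem cs ' ' h]
      have e1 : ((a : Int) + 1) = ((a + 1 : Nat) : Int) := by push_cast; ring
      rw [e1, ih (a + 1) (by omega)]
    · rw [PySem.List.pyRange_one_eq_nil (by exact_mod_cast by omega),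
          List.drop_eq_nil_of_le (by omega)]
      simp [PySem.List.enumerate]

theorem pvSpanEq_cons_self (c : Char) (ts : List Char) :
    pvSpanEq c (c :: ts) = ((pvSpanEq c ts).1 + 1, (pvSpanEq c ts).2) := by
  simp [pvSpanEq]

theorem pvSpanEq_decomp (c : Char) (ts : List Char) :
    ts = List.replicate (pvSpanEq c ts).1 c ++ (pvSpanEq c ts).2 := by
  induction ts with
  | nil => simp [pvSpanEq]
  | cons x xs ih =>
    by_cases hx : x = c
    · subst hx
      rw [pvSpanEq_cons_self]
      simpa [List.replicate_succ] using ih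
    · simp [pvSpanEq, hx]

theorem pvSpanEq_head_ne (c : Char) (ts : List Char) (d : Char)
    (h : (pvSpanEq c ts).2 ≠ []) : (pvSpanEq c ts).2.getD 0 d ≠ c := by
  induction ts with
  | nil => simp [pvSpanEq] at h
  | cons x xs ih =>
    by_cases hx : x = c
    · subst hx
      rw [pvSpanEq_cons_self] at h ⊢
      exact ih h
    · simp [pvSpanEq, hx]

-- A's state machine over the remaining characters equals the canonical run list
theorem pvMainA (m : Int) :
    ∀ (tail : List Char) (c : Char) (s k : Int) (runs : List (String × Int × Int)),
      pvFin m ((PySem.List.enumerate tail (s + k)).foldl (pvStepA m) (c, s, k, runs))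
        = runs ++ pvEmit m c s (k + ((pvSpanEq c tail).1 : Int))
            ++ pvRuns m (pvSpanEq c tail).2 (s + k + ((pvSpanEq c tail).1 : Int)) := by
  intro tail
  induction tail with
  | nil =>
    intro c s k runs
    simp [pvSpanEq, pvRuns, pvFin, PySem.List.enumerate]
  | cons x ts ih =>
    intro c s k runs
    rw [PySem.List.enumerate_cons, List.foldl_cons]
    by_cases hx : x = c
    · subst hx
      rw [show pvStepA m (x, s, k, runs) (s + k, x) = (x, s, k + 1, runs) from by
        simp [pvStepA]]
      have e1 : s + k + 1 = s + (k + 1) := by ring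
      rw [e1, ih x s (k + 1) runs, pvSpanEq_cons_self]
      have e2 : s + (k + 1) + (((pvSpanEq x ts).1 : Nat) : Int)
          = s + k + (((pvSpanEq x ts).1 + 1 : Nat) : Int) := by push_cast; ring
      have e3 : k + 1 + (((pvSpanEq x ts).1 : Nat) : Int)
          = k + (((pvSpanEq x ts).1 + 1 : Nat) : Int) := by push_cast; ring
      rw [e2, e3]
    · simp only [pvStepA, if_neg hx]
      rw [pvIfEmit m c s k runs]
      have e1 : s + k + 1 = (s + k) + 1 := by ring
      rw [e1, ih x (s + k) 1 (runs ++ pvEmit m c s k)]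
      simp only [pvSpanEq, if_neg hx]
      rw [pvRuns]
      simp only [Nat.cast_zero, add_zero]
      have e2 : (s + k) + 1 + (((pvSpanEq x ts).1 : Nat) : Int)
          = s + k + (((pvSpanEq x ts).1 : Nat) : Int) + 1 := by ring
      have e3 : (1 : Int) + (((pvSpanEq x ts).1 : Nat) : Int)
          = (((pvSpanEq x ts).1 : Nat) : Int) + 1 := by ring
      rw [e2, e3, List.append_assoc]

-- A equals the canonical run list
theorem pvA_eq_runs (sequence : String) (min_length : Int) :
    count_homopolymer_runs sequence min_length = pvRuns min_length sequence.toList 0 := by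
  unfold count_homopolymer_runs
  cases hcs : sequence.toList with
  | nil => simp [pvRuns]
  | cons c ts =>
    simp only [reduceCtorEq, if_false]
    have hb := pvBridge (c :: ts)
      (fun acc (j : Int) (ch : Char) =>
        if ch = acc.1 then (acc.1, acc.2.1, acc.2.2.1 + 1, acc.2.2.2)
        else (ch, j, 1,
              if acc.2.2.1 >= min_length then
                acc.2.2.2 ++ [(String.ofList [acc.1], acc.2.1, acc.2.2.1)]
              else acc.2.2.2))
      (c :: ts).length 1 (Nat.le_add_left _ _)
      (PySem.List.pyGetD (c :: ts) 0 ' ', 0, 1, [])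
    simp only [Nat.cast_one] at hb
    rw [hb]
    have hget : PySem.List.pyGetD (c :: ts) 0 ' ' = c := by
      simp [PySem.List.pyGetD, PySem.List.pyIdx?, PySem.List.pyGet?]
    rw [hget]
    have hstep :
        (fun (acc : Char × Int × Int × List (String × Int × Int)) (p : Int × Char) =>
          if p.2 = acc.1 then (acc.1, acc.2.1, acc.2.2.1 + 1, acc.2.2.2)
          else (p.2, p.1, 1,
                if acc.2.2.1 >= min_length then
                  acc.2.2.2 ++ [(String.ofList [acc.1], acc.2.1, acc.2.2.1)]
                else acc.2.2.2)) = pvStepA min_length := by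
      funext acc p; rfl
    have hdrop : (c :: ts).drop 1 = ts := rfl
    rw [hdrop, hstep]
    refine Eq.trans (b := pvFin min_length
      ((PySem.List.enumerate ts (1:Int)).foldl (pvStepA min_length) (c, 0, 1, []))) ?_ ?_
    · rw [pvIfEmit]
      rfl
    · have hfin := pvMainA min_length ts c 0 1 []
      norm_num at hfin
      rw [hfin, pvRuns]
      have e1 : (1 : Int) + ((pvSpanEq c ts).1 : Int) = ((pvSpanEq c ts).1 : Int) + 1 := by ring
      rw [e1, zero_add]

-- the boundary predicate of B
def pvP (cs : List Char) (i : Nat) : Bool := i == 0 || !(cs.getD i ' ' == cs.getD (i - 1) ' ')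

-- B's cut list equals the canonical cut list
theorem pvCuts_spec : ∀ (n : Nat) (cs : List Char), cs.length ≤ n →
    (List.range cs.length).filter (pvP cs) ++ [cs.length] = pvCuts cs := by
  intro n
  induction n with
  | zero =>
    intro cs h
    have : cs = [] := List.eq_nil_of_length_eq_zero (Nat.le_zero.mp h)
    subst this
    simp [pvCuts]
  | succ n ih =>
    intro cs h
    cases cs with
    | nil => simp [pvCuts]
    | cons c ts =>
      have hts := pvSpanEq_decomp c ts
      have hrl := pvSpanEq_len_le c ts
      set k := (pvSpanEq c ts).1 with hk
      set rest := (pvSpanEq c ts).2 with hr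
      have hcs : c :: ts = List.replicate (k + 1) c ++ rest := by
        rw [List.replicate_succ, List.cons_append, ← hts]
      have hlen : (c :: ts).length = (k + 1) + rest.length := by
        rw [hcs]; simp
      have hgetlo : ∀ i, i < k + 1 → (c :: ts).getD i ' ' = c := by
        intro i hi
        rw [hcs, List.getD_append _ _ _ _ (by simpa using hi)]
        simp [List.getD, hi]
      have hgethi : ∀ j, (c :: ts).getD ((k + 1) + j) ' ' = rest.getD j ' ' := by
        intro j
        rw [hcs, List.getD_eq_getElem?_getD, List.getElem?_append_right (by simp)]
        simp [List.getD_eq_getElem?_getD]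
      have hpart1 : (List.range (k + 1)).filter (pvP (c :: ts)) = [0] := by
        rw [List.range_succ_eq_map, List.filter_cons]
        have h0 : pvP (c :: ts) 0 = true := by simp [pvP]
        rw [if_pos h0, List.filter_map, List.filter_eq_nil_iff.mpr, List.map_nil]
        intro i hi
        simp only [List.mem_range] at hi
        simp only [Function.comp_apply, pvP, Nat.succ_eq_add_one]
        have e1 : (c :: ts).getD (i + 1) ' ' = c := hgetlo (i + 1) (by omega)
        have e2 : (c :: ts).getD (i + 1 - 1) ' ' = c := hgetlo i (by omega)
        simp only [e1, e2]
        simp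
      have hpart2 : ((List.range rest.length).map ((k + 1) + ·)).filter (pvP (c :: ts))
          = ((List.range rest.length).filter (pvP rest)).map ((k + 1) + ·) := by
        rw [List.filter_map]
        congr 1
        apply List.filter_congr
        intro j hj
        simp only [List.mem_range] at hj
        cases j with
        | zero =>
          have hne : rest.getD 0 ' ' ≠ c := by
            apply pvSpanEq_head_ne
            rw [← hr]; exact List.ne_nil_of_length_pos hj
          have e1 : (c :: ts).getD ((k + 1) + 0) ' ' = rest.getD 0 ' ' := hgethi 0
          have e2 : (c :: ts).getD ((k + 1) + 0 - 1) ' ' = c := by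
            simpa using hgetlo k (by omega)
          have hb : (rest.getD 0 ' ' == c) = false := beq_eq_false_iff_ne.mpr hne
          simp only [Function.comp_apply, pvP, e1, e2, hb]
          simp
        | succ j' =>
          have e1 : (c :: ts).getD ((k + 1) + (j' + 1)) ' ' = rest.getD (j' + 1) ' ' :=
            hgethi (j' + 1)
          have e2 : (c :: ts).getD ((k + 1) + (j' + 1) - 1) ' ' = rest.getD j' ' ' := by
            have : (k + 1) + (j' + 1) - 1 = (k + 1) + j' := by omega
            rw [this]; exact hgethi j'
          simp only [Function.comp_apply, pvP, e1, e2,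
            show (j' + 1) - 1 = j' from rfl]
          simp
      have hrest : rest.length ≤ n := by
        have := hrl; omega
      rw [hlen, List.range_add, List.filter_append, hpart1, hpart2, pvCuts]
      simp only [← hr, ← hk]
      rw [← ih rest hrest]
      have : [(k + 1) + rest.length] = ([rest.length]).map ((k + 1) + ·) := by simp
      rw [this]
      simp only [List.cons_append, List.nil_append, ← List.map_append]
      congr 1
      apply List.map_congr_left
      intro a _
      omega

theorem pvCuts_head (cs : List Char) : ∃ t, pvCuts cs = 0 :: t := by
  cases cs with
  | nil => exact ⟨[], by rw [pvCuts]⟩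
  | cons c ts => exact ⟨_, by rw [pvCuts]⟩

-- adjacent cut pairs, filtered and mapped, give the canonical run list
theorem pvMainB (m : Int) (full : List Char) :
    ∀ (fuel : Nat) (cs : List Char) (off : Nat), cs.length ≤ fuel → full.drop off = cs →
      (((pvCuts cs).map (· + off)).zip ((pvCuts cs).map (· + off)).tail).filterMap
        (fun p : Nat × Nat =>
          if ((p.2 : Int) - (p.1 : Int)) ≥ m then
            some (String.ofList [full.getD p.1 ' '], (p.1 : Int), (p.2 : Int) - (p.1 : Int))
          else none)
        = pvRuns m cs (off : Int) := by
  intro fuel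
  induction fuel with
  | zero =>
    intro cs off h _
    have : cs = [] := List.eq_nil_of_length_eq_zero (Nat.le_zero.mp h)
    subst this
    rw [pvCuts, pvRuns]
    simp
  | succ fuel ih =>
    intro cs off h hdrop
    cases cs with
    | nil =>
      rw [pvCuts, pvRuns]
      simp
    | cons c ts =>
      have hts := pvSpanEq_decomp c ts
      have hrl := pvSpanEq_len_le c ts
      set k := (pvSpanEq c ts).1 with hk
      set rest := (pvSpanEq c ts).2 with hr
      rw [pvCuts, pvRuns]
      simp only [← hk, ← hr]
      obtain ⟨t, ht⟩ := pvCuts_head rest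
      have hmm : (((pvCuts rest).map (· + (k + 1))).map (· + off))
          = (pvCuts rest).map (· + (off + (k + 1))) := by
        rw [List.map_map]
        apply List.map_congr_left
        intro a _
        simp only [Function.comp_apply]
        omega
      have hM : ((0 :: (pvCuts rest).map (· + (k + 1))).map (· + off))
          = off :: (off + (k + 1)) :: t.map (· + (off + (k + 1))) := by
        rw [List.map_cons, hmm, ht, List.map_cons]
        norm_num
      rw [hM]
      simp only [List.tail_cons, List.zip_cons_cons, List.filterMap_cons]
      -- the tail zip is exactly the induction hypothesis for rest at offset off + (k+1)
      have hdrop' : full.drop (off + (k + 1)) = rest := by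
        have h1 : (full.drop off).drop (k + 1) = full.drop (off + (k + 1)) := by
          rw [List.drop_drop]
        rw [← h1, hdrop]
        simp only [List.drop_succ_cons]
        rw [hts]
        exact List.drop_left' (by simp)
      simp only [List.length_cons] at h
      have hIH := ih rest (off + (k + 1)) (by omega) hdrop'
      rw [ht] at hIH
      simp only [List.map_cons, List.tail_cons, Nat.zero_add] at hIH
      rw [hIH]
      -- the head pair emits the first run
      have hgetc : full.getD off ' ' = c := by
        have h2 : (full.drop off)[(0 : Nat)]? = full[off + 0]? := List.getElem?_drop
        rw [hdrop] at h2
        have h1 : full[off]? = some c := by simpa using h2.symm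
        simp [List.getD_eq_getElem?_getD, h1]
      have hcast : ((off + (k + 1) : Nat) : Int) - ((off : Nat) : Int) = (k : Int) + 1 := by
        push_cast; ring
      have hpos : ((off + (k + 1) : Nat) : Int) = (off : Int) + (k : Int) + 1 := by
        push_cast; ring
      by_cases hc : (k : Int) + 1 ≥ m
      · rw [if_pos (by rw [hcast]; exact hc)]
        simp only [pvEmit, if_pos hc, hgetc, hpos, List.cons_append, List.nil_append]
        simp only [show ((off : Int) + k + 1 - off) = (k : Int) + 1 from by ring]
      · rw [if_neg (by rw [hcast]; exact hc)]
        simp only [pvEmit, if_neg hc, hpos, List.nil_append]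

theorem pvB_eq_runs (sequence : String) (min_length : Int) :
    count_homopolymer_runs_alt sequence min_length = pvRuns min_length sequence.toList 0 := by
  unfold count_homopolymer_runs_alt
  dsimp only
  have hP : (fun i => i == 0 || !(sequence.toList.getD i ' ' == sequence.toList.getD (i - 1) ' '))
      = pvP sequence.toList := rfl
  rw [hP, pvCuts_spec sequence.toList.length sequence.toList le_rfl]
  have hid : pvCuts sequence.toList = (pvCuts sequence.toList).map (· + 0) := by
    simp
  rw [hid]
  have := pvMainB min_length sequence.toList sequence.toList.length sequence.toList 0 le_rfl
    (by simp)
  simpa using this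

-- ===== VERDICT (by name: the statement is the Claim_ definition above) =====
theorem count_homopolymer_runs_spec : Claim_equal_count_homopolymer_runs := by
  intro sequence min_length _
  unfold Spec_count_homopolymer_runs
  rw [pvA_eq_runs, pvB_eq_runs]
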